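-- pv_equiv track=rewrite | github.com/JuliaSilver/Coreference-Resolution | Features.py | count_lemmas_intersection
-- ===== SOURCE A (Python) =====
-- def count_lemmas_intersection(lemmas_set_1, lemmas_set_2):
--     counter = 0
--     anteclongerthree = 0
--     anaphlongerthree = 0
--     for elem1 in lemmas_set_1:
--         for elem2 in lemmas_set_2:
--             if elem1 == elem2:
--                 counter += 1
--     len_1 = len(lemmas_set_1)
--     len_2 = len(lemmas_set_2)
--     if (len_1 > 3):
--         anteclongerthree = 1
--     if (len_2 > 3):
--         anaphlongerthree = 1
--
--     return counter, anteclongerthree, anaphlongerthree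
-- ===== SOURCE B (Python) =====
-- def count_lemmas_intersection(lemmas_set_1, lemmas_set_2):
--     freq = {}
--     for elem in lemmas_set_2:
--         freq[elem] = freq.get(elem, 0) + 1
--     counter = sum(freq.get(elem, 0) for elem in lemmas_set_1)
--     return counter, 1 if len(lemmas_set_1) > 3 else 0, 1 if len(lemmas_set_2) > 3 else 0
-- ===== Notes on version B (the rewrite author's own statement) =====
-- stated objective: faster
-- what changed: Replaces the nested O(n*m) pair scan with a frequency dict built once over lemmas_set_2 and a single summed lookup pass over lemmas_set_1.
import Mathlib
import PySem

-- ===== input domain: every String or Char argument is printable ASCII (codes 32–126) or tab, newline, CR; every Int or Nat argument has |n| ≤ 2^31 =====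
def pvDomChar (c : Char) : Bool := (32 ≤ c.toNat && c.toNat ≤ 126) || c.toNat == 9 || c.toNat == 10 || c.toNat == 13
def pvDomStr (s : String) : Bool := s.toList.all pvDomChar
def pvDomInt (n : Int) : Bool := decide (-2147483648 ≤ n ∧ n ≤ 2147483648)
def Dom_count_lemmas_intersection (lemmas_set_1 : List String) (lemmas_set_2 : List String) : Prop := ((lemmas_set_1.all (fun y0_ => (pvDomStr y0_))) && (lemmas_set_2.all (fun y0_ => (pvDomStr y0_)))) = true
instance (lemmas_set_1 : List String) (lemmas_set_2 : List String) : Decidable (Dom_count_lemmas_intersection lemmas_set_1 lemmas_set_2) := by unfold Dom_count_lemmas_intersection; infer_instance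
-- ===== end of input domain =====

-- ===== PORT A =====
-- B replaces the nested pair scan with a frequency dict over lemmas_set_2 and one lookup pass (faster).
def count_lemmas_intersection (lemmas_set_1 : List String) (lemmas_set_2 : List String) : Int × Int × Int :=
  let counter : Int :=
    lemmas_set_1.foldl (fun c elem1 =>
      lemmas_set_2.foldl (fun c elem2 => if elem1 == elem2 then c + 1 else c) c) 0
  let anteclongerthree : Int := if (lemmas_set_1.length : Int) > 3 then 1 else 0
  let anaphlongerthree : Int := if (lemmas_set_2.length : Int) > 3 then 1 else 0
  (counter, anteclongerthree, anaphlongerthree)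

-- ===== PORT B =====
def count_lemmas_intersection_alt (lemmas_set_1 : List String) (lemmas_set_2 : List String) : Int × Int × Int :=
  let freq : PySem.Dict String Int :=
    lemmas_set_2.foldl (fun d x => d.insert x (d.getD x 0 + 1)) PySem.Dict.empty
  let counter : Int := lemmas_set_1.foldl (fun s x => s + freq.getD x 0) 0
  (counter,
   if (lemmas_set_1.length : Int) > 3 then 1 else 0,
   if (lemmas_set_2.length : Int) > 3 then 1 else 0)

-- ===== PRECONDITION & SPEC =====
def Spec_count_lemmas_intersection (lemmas_set_1 : List String) (lemmas_set_2 : List String) (out : Int × Int × Int) : Prop := out = count_lemmas_intersection_alt lemmas_set_1 lemmas_set_2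
instance (lemmas_set_1 : List String) (lemmas_set_2 : List String) (out : Int × Int × Int) : Decidable (Spec_count_lemmas_intersection lemmas_set_1 lemmas_set_2 out) := by unfold Spec_count_lemmas_intersection; infer_instance

-- ===== CLAIM (what is proved, stated in full; the proofs are below) =====
def Claim_equal_count_lemmas_intersection : Prop := ∀ (lemmas_set_1 : List String) (lemmas_set_2 : List String), Dom_count_lemmas_intersection lemmas_set_1 lemmas_set_2 → Spec_count_lemmas_intersection lemmas_set_1 lemmas_set_2 (count_lemmas_intersection lemmas_set_1 lemmas_set_2)

-- ===== LEMMAS AND PROOFS =====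

-- ===== VERDICT (by name: the statement is the Claim_ definition above) =====
-- inner loop of A counts occurrences of elem1 in l2
lemma inner_count (e : String) (l2 : List String) (c : Int) :
    l2.foldl (fun c e2 => if e == e2 then c + 1 else c) c = c + l2.count e := by
  induction l2 generalizing c with
  | nil => simp
  | cons h t ih =>
    simp only [List.foldl, List.count_cons, ih]
    by_cases he : e = h
    · simp [he]; ring
    · have hb : (h == e) = false := by simp; exact fun w => he w.symm
      simp [he, hb]

lemma counters_eq (l1 l2 : List String) (a : Int) :
    l1.foldl (fun c elem1 => l2.foldl (fun c elem2 => if elem1 == elem2 then c + 1 else c) c) a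
    = l1.foldl (fun s x => s + (l2.foldl (fun d x => d.insert x (d.getD x 0 + 1)) PySem.Dict.empty).getD x 0) a := by
  induction l1 generalizing a with
  | nil => rfl
  | cons h t ih =>
    simp only [List.foldl]
    rw [inner_count, PySem.Dict.getD_foldl_insert_add_one, PySem.Dict.getD_empty, ih]
    ring_nf

theorem count_lemmas_intersection_spec : Claim_equal_count_lemmas_intersection := by
  intro l1 l2 _
  unfold Spec_count_lemmas_intersection count_lemmas_intersection count_lemmas_intersection_alt
  simp only []
  rw [counters_eq]
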